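-- pv_equiv track=rewrite | github.com/floordiv/FleshKernel | system/app.py | __grep
-- ===== SOURCE A (Python) =====
-- def __grep(text):
--     string_ident = '\'', '"'
--     current_ident = None
--     positions = []
--     is_string = False
--     for n in enumerate(text):
--         index, value = n
--         if not is_string and value in string_ident:
--             current_ident = value
--             is_string = True
--             positions.append([index, None])
--         elif is_string and value == current_ident:
--             positions[-1][1] = index + 1
--             is_string = False
--
--     if is_string:
--         raise SyntaxError('missed string quote')
--     return positions
-- ===== SOURCE B (Python) =====
-- import re
--
-- _STRING_RE = re.compile(r"'[^']*'|\"[^\"]*\"")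
--
-- def __grep(text):
--     positions = [[m.start(), m.end()] for m in _STRING_RE.finditer(text)]
--     rest = _STRING_RE.sub('', text)
--     if "'" in rest or '"' in rest:
--         raise SyntaxError('missed string quote')
--     return positions
-- ===== Notes on version B (the rewrite author's own statement) =====
-- stated objective: idiomatic
-- what changed: B replaces A's hand-written per-character FSM (is_string/current_ident state with in-place patching of the last position entry) by a single regex pass (re.finditer of '[^']*'|"[^"]*") that emits complete [start,end] spans directly, detecting an unclosed quote as a quote character surviving in the unmatched residue.
import Mathlib
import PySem

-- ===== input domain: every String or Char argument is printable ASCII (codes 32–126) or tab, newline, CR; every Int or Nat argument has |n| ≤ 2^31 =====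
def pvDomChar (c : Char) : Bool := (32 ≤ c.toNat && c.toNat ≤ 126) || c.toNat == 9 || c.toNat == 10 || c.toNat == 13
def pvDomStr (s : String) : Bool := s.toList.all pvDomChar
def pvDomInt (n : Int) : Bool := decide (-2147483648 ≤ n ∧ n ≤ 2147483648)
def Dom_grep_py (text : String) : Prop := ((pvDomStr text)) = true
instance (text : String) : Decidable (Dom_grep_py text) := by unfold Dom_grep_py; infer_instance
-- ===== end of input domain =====

-- B: regex-style single pass emitting whole [start,end] spans, instead of A's character FSM
-- with in-place patching of the last entry (objective: more idiomatic). On ill-quoted input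
-- both Pythons raise SyntaxError; Pre_ excludes exactly those inputs.


-- ===== PORT A =====
-- positions entries are (start, Option end): `None` in Python's [index, None] is `none` here;
-- positions[-1][1] = index + 1  is pvPatchLast.
def pvPatchLast (ps : List (Int × Option Int)) (v : Int) : List (Int × Option Int) :=
  match ps with
  | [] => []
  | [p] => [(p.1, some v)]
  | p :: q :: rest => p :: pvPatchLast (q :: rest) v

def pvStepA (st : Bool × Option Char × List (Int × Option Int)) (n : Int × Char) :
    Bool × Option Char × List (Int × Option Int) :=
  let (isString, currentIdent, positions) := st
  let (index, value) := n
  if isString = false ∧ (value = '\'' ∨ value = '"') then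
    (true, some value, positions ++ [(index, none)])
  else if isString = true ∧ some value = currentIdent then
    (false, currentIdent, pvPatchLast positions (index + 1))
  else st

def grep_py (text : String) : List (List Int) :=
  let r := (PySem.List.enumerate text.toList 0).foldl pvStepA (false, none, [])
  -- if is_string: raise SyntaxError('missed string quote')  → excluded by Pre_grep_py (r.1 = true there);
  -- inside Pre_ every second component is `some`, so the final map just strips the Option.
  r.2.2.map (fun p => [p.1, p.2.getD 0])

-- ===== PORT B =====
-- Hand port of the regex engine's behaviour for the pattern  '[^']*'|"[^"]*"  : exact —
-- at a quote char, the match succeeds iff the same quote occurs later (pvFindQuote), covering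
-- up to and including it; otherwise the engine retries from the next character, and the
-- unmatched character goes to the residue (re.sub('') = second component).
def pvFindQuote (c : Char) : List Char → Option Nat
  | [] => none
  | x :: xs => if x = c then some 0 else (pvFindQuote c xs).map (· + 1)

def pvFindIter : List Char → Int → List (Int × Int) × List Char
  | [], _ => ([], [])
  | c :: rest, i =>
    if c = '\'' ∨ c = '"' then
      match pvFindQuote c rest with
      | some j =>
        let r := pvFindIter (rest.drop (j + 1)) (i + (j : Int) + 2)
        ((i, i + (j : Int) + 2) :: r.1, r.2)
      | none =>
        let r := pvFindIter rest (i + 1)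
        (r.1, c :: r.2)
    else
      let r := pvFindIter rest (i + 1)
      (r.1, c :: r.2)
termination_by l _ => l.length
decreasing_by all_goals (simp [List.length_drop]; try omega)

def grep_py_alt (text : String) : List (List Int) :=
  let r := pvFindIter text.toList 0
  -- if a quote char is left in the residue r.2: raise SyntaxError → excluded by Pre_grep_py
  r.1.map (fun m => [m.1, m.2])

-- ===== PRECONDITION & SPEC =====
-- Pre_ excludes exactly the ill-quoted strings (a string literal opened by ' or " and never
-- closed by the same quote), on which Python A — and Python B alike — raises
-- SyntaxError('missed string quote').  pvQuotesClosed is the grammar of well-quoted text: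
-- outside a literal (mode = none) a quote opens a literal, inside (mode = some q) only q
-- closes it; the text is well-quoted iff it ends outside a literal.
def pvQuotesClosed (mode : Option Char) : List Char → Bool
  | [] => mode = none
  | c :: rest =>
    match mode with
    | none => if c = '\'' ∨ c = '"' then pvQuotesClosed (some c) rest else pvQuotesClosed none rest
    | some q => if c = q then pvQuotesClosed none rest else pvQuotesClosed (some q) rest

def Pre_grep_py (text : String) : Prop := pvQuotesClosed none text.toList = true
instance (text : String) : Decidable (Pre_grep_py text) := by unfold Pre_grep_py; infer_instance
def pvWitness_grep_py : String := "'a' + \"it's\""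

def Spec_grep_py (text : String) (out : List (List Int)) : Prop := out = grep_py_alt text
instance (text : String) (out : List (List Int)) : Decidable (Spec_grep_py text out) := by unfold Spec_grep_py; infer_instance

-- ===== CLAIM (what is proved, stated in full; the proofs are below) =====
def Claim_equal_grep_py : Prop := ∀ (text : String), Dom_grep_py text → Pre_grep_py text → Spec_grep_py text (grep_py text)

-- ===== LEMMAS AND PROOFS =====

-- proof-side restatement of well-quotedness following pvFindIter's recursion shape
def pvClosed : List Char → Bool
  | [] => true
  | c :: rest =>
    if c = '\'' ∨ c = '"' then
      match pvFindQuote c rest with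
      | some j => pvClosed (rest.drop (j + 1))
      | none => false
    else pvClosed rest
termination_by l => l.length
decreasing_by all_goals (simp [List.length_drop]; try omega)

theorem pvQuotesClosed_some (rest : List Char) (c : Char) :
    pvQuotesClosed (some c) rest
      = (match pvFindQuote c rest with
         | some j => pvQuotesClosed none (rest.drop (j + 1))
         | none => false) := by
  induction rest with
  | nil => rfl
  | cons x xs ih =>
    by_cases hx : x = c
    · subst hx; simp [pvQuotesClosed, pvFindQuote]
    · simp only [pvQuotesClosed, if_neg hx, ih, pvFindQuote, hx, if_neg hx]
      cases pvFindQuote c xs <;> simp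
theorem pvQuotesClosed_eq_pvClosed (n : Nat) : ∀ (l : List Char), l.length ≤ n →
    pvQuotesClosed none l = pvClosed l := by
  induction n with
  | zero =>
    intro l hl
    have : l = [] := List.length_eq_zero_iff.mp (Nat.le_zero.mp hl)
    subst this; simp [pvQuotesClosed, pvClosed]
  | succ n ih =>
    intro l hl
    cases l with
    | nil => simp [pvQuotesClosed, pvClosed]
    | cons c rest =>
      by_cases hq : c = '\'' ∨ c = '"'
      · rw [pvClosed, if_pos hq]
        simp only [pvQuotesClosed, if_pos hq, pvQuotesClosed_some]
        cases hfq : pvFindQuote c rest with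
        | none => simp
        | some j =>
          simp only
          exact ih _ (by simp at hl ⊢; omega)
      · rw [pvClosed, if_neg hq]
        simp only [pvQuotesClosed, if_neg hq]
        exact ih rest (by simpa using Nat.le_of_succ_le_succ hl)

theorem pvPatchLast_append_singleton (xs : List (Int × Option Int)) (x : Int × Option Int) (v : Int) :
    pvPatchLast (xs ++ [x]) v = xs ++ [(x.1, some v)] := by
  induction xs with
  | nil => rfl
  | cons a xs ih =>
    cases xs with
    | nil => simp [pvPatchLast]
    | cons b xs => simpa [pvPatchLast] using ih

theorem pvFindQuote_split (c : Char) (l : List Char) (j : Nat) (h : pvFindQuote c l = some j) :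
    ∃ pre suf, l = pre ++ c :: suf ∧ pre.length = j ∧ c ∉ pre ∧ l.drop (j + 1) = suf := by
  induction l generalizing j with
  | nil => simp [pvFindQuote] at h
  | cons x xs ih =>
    by_cases hx : x = c
    · simp [pvFindQuote, hx] at h
      subst h
      exact ⟨[], xs, by simp [hx], rfl, by simp, by simp⟩
    · simp [pvFindQuote, hx] at h
      obtain ⟨j', hj', rfl⟩ := h
      obtain ⟨pre, suf, hl, hlen, hmem, hdrop⟩ := ih j' hj'
      refine ⟨x :: pre, suf, by simpa using congrArg (x :: ·) hl, by simp [hlen], ?_, by simpa using hdrop⟩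
      simp [hmem]; exact fun hc => hx hc.symm

theorem foldA_skip (pre : List Char) (c : Char) (hc : c ∉ pre) (i : Int)
    (acc : List (Int × Option Int)) :
    (PySem.List.enumerate pre i).foldl pvStepA (true, some c, acc) = (true, some c, acc) := by
  induction pre generalizing i with
  | nil => simp [PySem.List.enumerate_nil]
  | cons x xs ih =>
    have hx : x ≠ c := fun h => hc (h ▸ List.mem_cons_self)
    rw [PySem.List.enumerate_cons, List.foldl_cons]
    have : pvStepA (true, some c, acc) (i, x) = (true, some c, acc) := by
      simp [pvStepA]
      exact hx
    rw [this]
    exact ih (fun h => hc (List.mem_cons_of_mem _ h)) _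

theorem foldA_closed (n : Nat) : ∀ (l : List Char), l.length ≤ n → pvClosed l = true →
    ∀ (i : Int) (cur : Option Char) (acc : List (Int × Option Int)),
    ∃ cur', (PySem.List.enumerate l i).foldl pvStepA (false, cur, acc)
      = (false, cur', acc ++ (pvFindIter l i).1.map (fun m => (m.1, some m.2))) := by
  induction n with
  | zero =>
    intro l hl _ i cur acc
    have : l = [] := List.length_eq_zero_iff.mp (Nat.le_zero.mp hl)
    subst this
    exact ⟨cur, by simp [PySem.List.enumerate_nil, pvFindIter]⟩
  | succ n ih =>
    intro l hl hcl i cur acc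
    cases l with
    | nil => exact ⟨cur, by simp [PySem.List.enumerate_nil, pvFindIter]⟩
    | cons c rest =>
      by_cases hq : c = '\'' ∨ c = '"'
      · -- a quote opens here; pvClosed forces a closing quote at some j in rest
        cases hfq : pvFindQuote c rest with
        | none => rw [pvClosed, if_pos hq, hfq] at hcl; exact absurd hcl (by simp)
        | some j =>
          rw [pvClosed, if_pos hq, hfq] at hcl
          replace hcl : pvClosed (List.drop (j + 1) rest) = true := by simpa using hcl
          obtain ⟨pre, suf, hsplit, hlen, hmem, hdrop⟩ := pvFindQuote_split c rest j hfq
          rw [PySem.List.enumerate_cons, List.foldl_cons]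
          have hstep : pvStepA (false, cur, acc) (i, c) = (true, some c, acc ++ [(i, none)]) := by
            simp [pvStepA, hq]
          rw [hstep]
          -- compute B's side first
          simp only [pvFindIter, if_pos hq, hfq, hdrop]
          rw [hdrop] at hcl
          -- walk the string body: rest = pre ++ c :: suf
          rw [show rest = pre ++ c :: suf from hsplit,
              PySem.List.enumerate_append, List.foldl_append, foldA_skip pre c hmem,
              PySem.List.enumerate_cons, List.foldl_cons]
          have hstep2 : pvStepA (true, some c, acc ++ [(i, none)]) (i + 1 + pre.length, c)
              = (false, some c, acc ++ [(i, some (i + (j : Int) + 2))]) := by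
            simp [pvStepA, pvPatchLast_append_singleton, hlen]
            omega
          rw [hstep2,
              show i + 1 + (pre.length : Int) + 1 = i + (j : Int) + 2 by rw [hlen]; ring]
          obtain ⟨cur', hcur⟩ := ih suf (by simp [← hdrop] at hl ⊢; omega) hcl
            (i + (j : Int) + 2) (some c) (acc ++ [(i, some (i + (j : Int) + 2))])
          exact ⟨cur', by rw [hcur]; simp⟩
      · -- ordinary character: both sides just move on
        rw [pvClosed, if_neg hq] at hcl
        rw [PySem.List.enumerate_cons, List.foldl_cons]
        have hstep : pvStepA (false, cur, acc) (i, c) = (false, cur, acc) := by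
          simp [pvStepA, hq]
        rw [hstep]
        obtain ⟨cur', hcur⟩ := ih rest (by simpa using Nat.le_of_succ_le_succ hl) hcl (i+1) cur acc
        refine ⟨cur', ?_⟩
        rw [hcur, pvFindIter, if_neg hq]

-- ===== VERDICT (by name: the statement is the Claim_ definition above) =====
theorem grep_py_spec : Claim_equal_grep_py := by
  intro text _ hpre
  unfold Spec_grep_py grep_py grep_py_alt
  rw [Pre_grep_py, pvQuotesClosed_eq_pvClosed text.toList.length text.toList le_rfl] at hpre
  obtain ⟨cur', hcur⟩ := foldA_closed text.toList.length text.toList le_rfl hpre 0 none []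
  rw [hcur]
  simp [List.map_map, Function.comp]
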